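-- pv_equiv track=rewrite | github.com/VulDeeLocator/VulDeeLocator | src/preprocess_dl_Input_version4.py | sample_place_sequence
-- ===== SOURCE A (Python) =====
-- def sample_place_sequence(maxlen, vulner_pointer, linetokens):
--
--     if vulner_pointer == []:
--         place_sequence = [1]*maxlen
--         return place_sequence
--
--     place_sequence = [0]*maxlen
--     linetokens.append(maxlen)
--     for pointer in vulner_pointer:
--         left = pointer
--         right = linetokens[linetokens.index(pointer)+1]
--         if left >= maxlen:
--             continue
--         if right >= maxlen:
--             right = maxlen
--         for i in range(left, right):
--             place_sequence[i] = 1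
--
--     return place_sequence
-- ===== SOURCE B (Python) =====
-- def sample_place_sequence(maxlen, vulner_pointer, linetokens):
--
--     if vulner_pointer == []:
--         return [1] * maxlen
--
--     linetokens.append(maxlen)
--     diff = [0] * (max(maxlen, 0) + 1)
--     for pointer in vulner_pointer:
--         left = max(pointer, 0)
--         if left >= maxlen:
--             continue
--         right = min(linetokens[linetokens.index(pointer) + 1], maxlen)
--         if left < right:
--             diff[left] += 1
--             diff[right] -= 1
--
--     run = 0
--     place_sequence = []
--     for i in range(maxlen):
--         run += diff[i]
--         place_sequence.append(1 if run > 0 else 0)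
--     return place_sequence
-- ===== Notes on version B (the rewrite author's own statement) =====
-- stated objective: alternative
-- what changed: Replaces A's per-cell inner fill loop over every token interval with difference-array range updates followed by a single prefix-sum sweep (thresholding the running sum at >0), and clamps negative interval starts to 0 instead of wrapping.
-- intended difference: On inputs with a negative pointer and maxlen>0, A's fill loop writes through Python's negative-index wraparound and can mark end-of-sequence cells starting at maxlen+pointer; B clamps the interval start to 0 and marks only the real token range, the intended behaviour. — e.g. on sample_place_sequence(3, [-1], [-1, 1]): A returns [1, 0, 1], B returns [1, 0, 0]
-- outside the precondition, e.g. on sample_place_sequence(2, [-5], [-5, -6]): A returns [0, 0], B returns [0, 0]; on sample_place_sequence(3, [0], [1, 2]): A raises ValueError, B raises ValueError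
import Mathlib
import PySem

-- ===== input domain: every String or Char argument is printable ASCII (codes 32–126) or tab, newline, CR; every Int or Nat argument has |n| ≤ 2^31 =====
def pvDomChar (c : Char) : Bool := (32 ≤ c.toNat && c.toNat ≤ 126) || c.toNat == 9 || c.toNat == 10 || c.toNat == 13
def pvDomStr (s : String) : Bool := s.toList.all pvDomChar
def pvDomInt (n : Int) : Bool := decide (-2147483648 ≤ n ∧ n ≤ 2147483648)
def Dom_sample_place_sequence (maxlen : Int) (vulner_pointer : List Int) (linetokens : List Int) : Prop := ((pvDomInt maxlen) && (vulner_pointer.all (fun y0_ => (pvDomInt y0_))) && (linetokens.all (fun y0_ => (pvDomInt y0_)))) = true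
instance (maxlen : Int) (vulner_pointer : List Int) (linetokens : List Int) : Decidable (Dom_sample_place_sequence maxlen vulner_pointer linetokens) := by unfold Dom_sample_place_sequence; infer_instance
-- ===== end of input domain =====

-- B replaces A's per-cell inner fill loop with difference-array range updates plus one prefix-sum
-- sweep, and clamps negative interval starts to 0 (stated as intended difference D_ below).
-- Both A and B append maxlen to the caller's linetokens list; the theorems are about the return value.

-- ===== PORT A =====
-- shared helper: Python's `linetokens[linetokens.index(pointer)+1]` computed on linetokens+[maxlen];
-- `none` exactly where Python raises (ValueError from .index, IndexError from the [..+1] access)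
def pvNextTok' (L : List Int) (p : Int) : Option Int :=
  match PySem.List.index? L p with
  | none => none
  | some idx => PySem.List.pyGet? L ((idx : Int) + 1)

def pvNextTok (maxlen : Int) (linetokens : List Int) (p : Int) : Option Int :=
  pvNextTok' (linetokens ++ [maxlen]) p

-- `for i in range(left, right): place_sequence[i] = 1`
def pvFillA (ps : List Int) (l r : Int) : List Int :=
  (PySem.List.pyRange l r 1).foldl (fun ps i => PySem.List.pySetD ps i 1) ps

-- one iteration of A's `for pointer in vulner_pointer` loop
def pvStepA (maxlen : Int) (linetokens : List Int) (ps : List Int) (p : Int) : List Int :=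
  match pvNextTok maxlen linetokens p with
  | none => ps          -- Python raises here; such inputs are outside Pre_
  | some right =>
    if p ≥ maxlen then ps
    else pvFillA ps p (if right ≥ maxlen then maxlen else right)

def sample_place_sequence (maxlen : Int) (vulner_pointer : List Int) (linetokens : List Int) : List Int :=
  if vulner_pointer = [] then List.replicate maxlen.toNat 1
  else vulner_pointer.foldl (pvStepA maxlen linetokens) (List.replicate maxlen.toNat 0)

-- ===== PORT B =====
-- one iteration of B's range-update loop on the difference array
def pvStepB (maxlen : Int) (linetokens : List Int) (diff : List Int) (p : Int) : List Int :=
  let left := max p 0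
  if left ≥ maxlen then diff
  else
    match pvNextTok maxlen linetokens p with
    | none => diff      -- Python raises here; such inputs are outside Pre_
    | some s =>
      let right := min s maxlen
      if left < right then
        let d1 := PySem.List.pySetD diff left (PySem.List.pyGetD diff left 0 + 1)
        PySem.List.pySetD d1 right (PySem.List.pyGetD d1 right 0 - 1)
      else diff

def sample_place_sequence_alt (maxlen : Int) (vulner_pointer : List Int) (linetokens : List Int) : List Int :=
  if vulner_pointer = [] then List.replicate maxlen.toNat 1
  else
    let diff := vulner_pointer.foldl (pvStepB maxlen linetokens)
      (List.replicate ((max maxlen 0).toNat + 1) (0 : Int))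
    ((PySem.List.pyRange 0 maxlen 1).foldl
      (fun (st : Int × List Int) i =>
        let run := st.1 + PySem.List.pyGetD diff i 0
        (run, st.2 ++ [if run > 0 then (1 : Int) else 0]))
      ((0 : Int), ([] : List Int))).2

-- ===== PRECONDITION & SPEC =====
-- Pre_ excludes inputs where A raises: a pointer missing from linetokens (ValueError from .index),
-- and pointers below -|maxlen|, where A's fill loop generally raises IndexError (on the few such
-- inputs whose interval is empty A still returns — see the cites; B agrees there anyway).
def Pre_sample_place_sequence (maxlen : Int) (vulner_pointer : List Int) (linetokens : List Int) : Prop :=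
  vulner_pointer = [] ∨ ∀ p ∈ vulner_pointer, p ∈ linetokens ∧ (maxlen ≤ p ∨ -maxlen ≤ p)
instance (maxlen : Int) (vulner_pointer : List Int) (linetokens : List Int) : Decidable (Pre_sample_place_sequence maxlen vulner_pointer linetokens) := by unfold Pre_sample_place_sequence; infer_instance

def pvWitness_sample_place_sequence : Int × List Int × List Int := (3, [0], [0, 2])

-- On inputs where a negative pointer's token interval, written by A's fill loop through Python's
-- negative-index wraparound, marks an end-of-sequence cell that no pointer's interval covers,
-- A returns that accidental end-marking; B clamps the interval start to 0 and marks only the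
-- real token range, the intended behaviour.
def D_sample_place_sequence (maxlen : Int) (vulner_pointer : List Int) (linetokens : List Int) : Prop :=
  ∃ p ∈ vulner_pointer, p < 0 ∧ ∃ j ∈ PySem.List.pyRange (max (maxlen + p) 0)
      (maxlen + min ((pvNextTok maxlen linetokens p).getD p) 0) 1,
    ∀ q ∈ vulner_pointer, j < q ∨ (pvNextTok maxlen linetokens q).getD q ≤ j
instance (maxlen : Int) (vulner_pointer : List Int) (linetokens : List Int) : Decidable (D_sample_place_sequence maxlen vulner_pointer linetokens) := by unfold D_sample_place_sequence; infer_instance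

def Spec_sample_place_sequence (maxlen : Int) (vulner_pointer : List Int) (linetokens : List Int) (out : List Int) : Prop := ¬ D_sample_place_sequence maxlen vulner_pointer linetokens → out = sample_place_sequence_alt maxlen vulner_pointer linetokens
instance (maxlen : Int) (vulner_pointer : List Int) (linetokens : List Int) (out : List Int) : Decidable (Spec_sample_place_sequence maxlen vulner_pointer linetokens out) := by unfold Spec_sample_place_sequence; infer_instance

def pvDiffWitness_sample_place_sequence : Int × List Int × List Int := (3, [-1], [-1, 1])
def pvDiffWitnessOut_sample_place_sequence : (List Int) × (List Int) := ([1, 0, 1], [1, 0, 0])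

-- ===== CLAIM (what is proved, stated in full; the proofs are below) =====
def Claim_unchanged_sample_place_sequence : Prop := ∀ (maxlen : Int) (vulner_pointer : List Int) (linetokens : List Int), Dom_sample_place_sequence maxlen vulner_pointer linetokens → Pre_sample_place_sequence maxlen vulner_pointer linetokens → Spec_sample_place_sequence maxlen vulner_pointer linetokens (sample_place_sequence maxlen vulner_pointer linetokens)
def Claim_changed_sample_place_sequence : Prop := Dom_sample_place_sequence (pvDiffWitness_sample_place_sequence.1) (pvDiffWitness_sample_place_sequence.2.1) (pvDiffWitness_sample_place_sequence.2.2) ∧ Pre_sample_place_sequence (pvDiffWitness_sample_place_sequence.1) (pvDiffWitness_sample_place_sequence.2.1) (pvDiffWitness_sample_place_sequence.2.2) ∧ D_sample_place_sequence (pvDiffWitness_sample_place_sequence.1) (pvDiffWitness_sample_place_sequence.2.1) (pvDiffWitness_sample_place_sequence.2.2) ∧ sample_place_sequence (pvDiffWitness_sample_place_sequence.1) (pvDiffWitness_sample_place_sequence.2.1) (pvDiffWitness_sample_place_sequence.2.2) = pvDiffWitnessOut_sample_place_sequence.1 ∧ sample_place_sequence_alt (pvDiffWitness_sample_place_sequence.1)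 (pvDiffWitness_sample_place_sequence.2.1) (pvDiffWitness_sample_place_sequence.2.2) = pvDiffWitnessOut_sample_place_sequence.2 ∧ pvDiffWitnessOut_sample_place_sequence.1 ≠ pvDiffWitnessOut_sample_place_sequence.2

def Claim_exact_sample_place_sequence : Prop := ∀ (maxlen : Int) (vulner_pointer : List Int) (linetokens : List Int), Dom_sample_place_sequence maxlen vulner_pointer linetokens → Pre_sample_place_sequence maxlen vulner_pointer linetokens → D_sample_place_sequence maxlen vulner_pointer linetokens → sample_place_sequence maxlen vulner_pointer linetokens ≠ sample_place_sequence_alt maxlen vulner_pointer linetokens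

-- ===== LEMMAS AND PROOFS =====

def pvMark (maxlen : Int) (lt : List Int) (p : Int) (k : Nat) : Bool :=
  match pvNextTok maxlen lt p with
  | some s => decide (max p 0 ≤ (k : Int) ∧ (k : Int) < min s maxlen)
  | none => false

def pvCommon (maxlen : Int) (lt : List Int) (vp : List Int) : List Int :=
  (List.range maxlen.toNat).map (fun k => if vp.any (fun p => pvMark maxlen lt p k) then (1 : Int) else 0)

def pvMarkA (maxlen : Int) (lt : List Int) (p : Int) (k : Nat) : Bool :=
  match pvNextTok maxlen lt p with
  | none => false
  | some s =>
    if p ≥ maxlen then false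
    else decide ((p ≤ (k : Int) ∧ (k : Int) < (if s ≥ maxlen then maxlen else s)) ∨
                 (p ≤ (k : Int) - maxlen ∧ (k : Int) - maxlen < (if s ≥ maxlen then maxlen else s)))

def pvCommonA (maxlen : Int) (lt : List Int) (vp : List Int) : List Int :=
  (List.range maxlen.toNat).map (fun k => if vp.any (fun p => pvMarkA maxlen lt p k) then (1 : Int) else 0)

theorem pvNextTok_of_mem (maxlen : Int) (lt : List Int) (p : Int) (h : p ∈ lt) :
    ∃ s, pvNextTok maxlen lt p = some s := by
  unfold pvNextTok pvNextTok'
  have h2 := PySem.List.index?_append_of_mem (l := lt) [maxlen] h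
  have h1 := (PySem.List.index?_isSome_iff (xs := lt) (v := p)).2 h
  obtain ⟨i, hi⟩ := Option.isSome_iff_exists.1 h1
  obtain ⟨hk, -, -⟩ := PySem.List.getElem_of_index?_eq_some hi
  rw [h2, hi]
  show ∃ s, PySem.List.pyGet? (lt ++ [maxlen]) ((i : Int) + 1) = some s
  have hcast : ((i : Int) + 1) = ((i + 1 : Nat) : Int) := by push_cast; ring
  rw [hcast, PySem.List.pyGet?_natCast]
  have hlen : i + 1 < (lt ++ [maxlen]).length := by simp; omega
  exact ⟨_, List.getElem?_eq_getElem hlen⟩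

theorem length_fill_go (L : List Int) : ∀ ps : List Int,
    (L.foldl (fun ps i => PySem.List.pySetD ps i 1) ps).length = ps.length := by
  induction L with
  | nil => intro ps; rfl
  | cons x xs ih => intro ps; simp only [List.foldl_cons]; rw [ih]; exact PySem.List.length_pySetD _ _ _

theorem getD_pySetD (ps : List Int) (i v : Int) (hlo : -(ps.length : Int) ≤ i)
    (hhi : i < (ps.length : Int)) (k : Nat) :
    (PySem.List.pySetD ps i v).getD k 0 =
      if (k : Int) = (if 0 ≤ i then i else (ps.length : Int) + i) then v else ps.getD k 0 := by
  unfold PySem.List.pySetD PySem.List.pySet? PySem.List.pyIdx?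
  by_cases h0 : 0 ≤ i
  · simp only [h0, if_pos, hhi, Option.map_some, Option.getD_some]
    rw [List.getD_eq_getElem?_getD, List.getElem?_set, List.getD_eq_getElem?_getD]
    split_ifs with h1 h2 h3 <;> first | rfl | omega
  · simp only [h0, if_false, hlo, if_pos, Option.map_some, Option.getD_some]
    rw [List.getD_eq_getElem?_getD, List.getElem?_set, List.getD_eq_getElem?_getD]
    split_ifs with h1 h2 h3 <;> first | rfl | omega

theorem getD_pvFillA (l r : Int) (ps : List Int)
    (hl : -(ps.length : Int) ≤ l) (hr : r ≤ (ps.length : Int)) (k : Nat) (hk : k < ps.length) :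
    (pvFillA ps l r).getD k 0 =
      if (l ≤ (k : Int) ∧ (k : Int) < r) ∨
         (l ≤ (k : Int) - ps.length ∧ (k : Int) - (ps.length : Int) < r) then 1
      else ps.getD k 0 := by
  by_cases hnil : r ≤ l
  case pos =>
    unfold pvFillA
    rw [PySem.List.pyRange_one_eq_nil hnil]
    simp only [List.foldl_nil]
    rw [if_neg]; omega
  case neg =>
    have hm : ∃ m : Nat, (r - l).toNat = m := ⟨_, rfl⟩
    obtain ⟨m, hm⟩ := hm
    induction m generalizing l ps with
    | zero => omega
    | succ m ih =>
      have hlr : l < r := by omega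
      have hstep : pvFillA ps l r = pvFillA (PySem.List.pySetD ps l 1) (l + 1) r := by
        unfold pvFillA
        rw [PySem.List.pyRange_one_cons hlr]
        rfl
      rw [hstep]
      have hlen : (PySem.List.pySetD ps l 1).length = ps.length := PySem.List.length_pySetD _ _ _
      by_cases hrl1 : r ≤ l + 1
      · unfold pvFillA
        rw [PySem.List.pyRange_one_eq_nil hrl1]
        simp only [List.foldl_nil]
        rw [getD_pySetD ps l 1 hl (by omega) k]
        split_ifs <;> first | rfl | omega
      · rw [ih (l + 1) (PySem.List.pySetD ps l 1) (by rw [hlen]; omega) (by rw [hlen]; omega)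
          (by rw [hlen]; exact hk) hrl1 (by omega)]
        rw [hlen, getD_pySetD ps l 1 hl (by omega) k]
        split_ifs <;> first | rfl | omega

theorem length_pvFillA (ps : List Int) (l r : Int) : (pvFillA ps l r).length = ps.length := length_fill_go _ _

theorem length_pvCommonA (maxlen : Int) (lt vp : List Int) :
    (pvCommonA maxlen lt vp).length = maxlen.toNat := by
  simp [pvCommonA]

theorem getD_pvCommonA (maxlen : Int) (lt vp : List Int) (k : Nat) (hk : k < maxlen.toNat) :
    (pvCommonA maxlen lt vp).getD k 0 =
      if vp.any (fun p => pvMarkA maxlen lt p k) then 1 else 0 := by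
  unfold pvCommonA
  rw [List.getD_eq_getElem?_getD, List.getElem?_map, List.getElem?_range hk]
  rfl

theorem stepA_commonA (maxlen : Int) (lt : List Int) (pref : List Int) (p : Int)
    (hmem : p ∈ lt) (hbd : maxlen ≤ p ∨ -maxlen ≤ p) :
    pvStepA maxlen lt (pvCommonA maxlen lt pref) p = pvCommonA maxlen lt (pref ++ [p]) := by
  obtain ⟨s, hs⟩ := pvNextTok_of_mem maxlen lt p hmem
  have hmarkp : ∀ k : Nat, pvMarkA maxlen lt p k =
      (if p ≥ maxlen then false
       else decide ((p ≤ (k : Int) ∧ (k : Int) < (if s ≥ maxlen then maxlen else s)) ∨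
                    (p ≤ (k : Int) - maxlen ∧ (k : Int) - maxlen < (if s ≥ maxlen then maxlen else s)))) := by
    intro k; unfold pvMarkA; rw [hs]
  unfold pvStepA
  rw [hs]
  dsimp only
  by_cases hge : p ≥ maxlen
  · rw [if_pos hge]
    unfold pvCommonA
    apply List.map_congr_left
    intro k hk
    rw [List.mem_range] at hk
    have hmark : pvMarkA maxlen lt p k = false := by rw [hmarkp k, if_pos hge]
    simp [hmark]
  · rw [if_neg hge]
    have hplt : p < maxlen := by omega
    have hpm : -maxlen ≤ p := by rcases hbd with h | h; omega; exact h
    have hml : 0 < maxlen := by omega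
    apply List.ext_getElem
    · rw [length_pvFillA, length_pvCommonA, length_pvCommonA]
    · intro k h1 h2
      have hk : k < maxlen.toNat := by rwa [length_pvCommonA] at h2
      have hClen : (pvCommonA maxlen lt pref).length = maxlen.toNat := length_pvCommonA _ _ _
      rw [← List.getD_eq_getElem _ 0, ← List.getD_eq_getElem _ 0]
      rw [getD_pvFillA _ _ _ (by rw [hClen]; omega) (by rw [hClen]; split_ifs <;> omega) k (by omega)]
      rw [hClen, getD_pvCommonA _ _ _ _ hk, getD_pvCommonA _ _ _ _ hk]
      rw [List.any_append]
      simp only [List.any_cons, List.any_nil, Bool.or_false, hmarkp k, if_neg hge]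
      clear hmarkp
      cases hany : pref.any (fun q => pvMarkA maxlen lt q k)
      · simp only [Bool.false_or]
        split_ifs <;> first | rfl | (simp_all only [decide_eq_true_iff]; omega) | simp_all
      · simp only [Bool.true_or, if_pos]
        split_ifs <;> rfl

theorem foldA_commonA (maxlen : Int) (lt : List Int) : ∀ (rest pref : List Int),
    (∀ p ∈ rest, p ∈ lt ∧ (maxlen ≤ p ∨ -maxlen ≤ p)) →
    rest.foldl (pvStepA maxlen lt) (pvCommonA maxlen lt pref) = pvCommonA maxlen lt (pref ++ rest) := by
  intro rest
  induction rest with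
  | nil => intro pref _; simp
  | cons p ps ih =>
    intro pref h
    obtain ⟨h1, h2⟩ := h p List.mem_cons_self
    simp only [List.foldl_cons]
    rw [stepA_commonA maxlen lt pref p h1 h2]
    rw [ih (pref ++ [p]) (fun q hq => h q (List.mem_cons_of_mem _ hq))]
    simp

theorem pvCommonA_nil (maxlen : Int) (lt : List Int) :
    pvCommonA maxlen lt [] = List.replicate maxlen.toNat 0 := by
  simp [pvCommonA]

theorem getD_pvCommon (maxlen : Int) (lt vp : List Int) (k : Nat) (hk : k < maxlen.toNat) :
    (pvCommon maxlen lt vp).getD k 0 =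
      if vp.any (fun p => pvMark maxlen lt p k) then 1 else 0 := by
  unfold pvCommon
  rw [List.getD_eq_getElem?_getD, List.getElem?_map, List.getElem?_range hk]
  rfl

def pvCov (maxlen : Int) (lt : List Int) (vp : List Int) (j : Int) : Bool :=
  vp.any fun q => decide (q ≤ j ∧ j < (pvNextTok maxlen lt q).getD q)

theorem uncov_iff (maxlen : Int) (lt vp : List Int) (j : Int) :
    (∀ q ∈ vp, j < q ∨ (pvNextTok maxlen lt q).getD q ≤ j) ↔ pvCov maxlen lt vp j = false := by
  unfold pvCov
  rw [List.any_eq_false]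
  constructor
  · intro h q hq
    simp only [decide_eq_true_eq]
    rcases h q hq with h1 | h1 <;> omega
  · intro h q hq
    have := h q hq
    simp only [decide_eq_true_eq] at this
    omega

theorem cov_eq_any_mark (maxlen : Int) (lt vp : List Int) (k : Nat) (hk : k < maxlen.toNat) :
    pvCov maxlen lt vp ((k : Nat) : Int) = vp.any (fun q => pvMark maxlen lt q k) := by
  unfold pvCov pvMark
  congr 1
  funext q
  cases hnt : pvNextTok maxlen lt q with
  | none =>
    simp only [Option.getD_none, decide_eq_false_iff_not]
    omega
  | some s =>
    simp only [Option.getD_some, decide_eq_decide]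
    omega

theorem commonA_eq_common (maxlen : Int) (lt vp : List Int)
    (hpre : ∀ p ∈ vp, p ∈ lt ∧ (maxlen ≤ p ∨ -maxlen ≤ p))
    (hcov : ∀ p ∈ vp, ∀ j ∈ PySem.List.pyRange (max (maxlen + p) 0)
        (maxlen + min ((pvNextTok maxlen lt p).getD p) 0) 1,
        pvCov maxlen lt vp j = true) :
    pvCommonA maxlen lt vp = pvCommon maxlen lt vp := by
  unfold pvCommonA pvCommon
  apply List.map_congr_left
  intro k hk
  rw [List.mem_range] at hk
  have hmax : (k : Int) < maxlen := by omega
  have hiff : ((vp.any fun p => pvMarkA maxlen lt p k) = true) ↔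
      ((vp.any fun p => pvMark maxlen lt p k) = true) := by
    constructor
    · intro h; rw [List.any_eq_true] at h ⊢
      obtain ⟨p, hp, hA⟩ := h
      unfold pvMarkA at hA
      cases hnt : pvNextTok maxlen lt p with
      | none => rw [hnt] at hA; cases hA
      | some s =>
        rw [hnt] at hA
        dsimp only at hA
        by_cases hge : p ≥ maxlen
        · rw [if_pos hge] at hA; cases hA
        · rw [if_neg hge, decide_eq_true_iff] at hA
          have hbd := (hpre p hp).2
          have hplt : p < maxlen := by omega
          have hpm : -maxlen ≤ p := by rcases hbd with h' | h'; omega; exact h'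
          rcases hA with h1 | h2
          · refine ⟨p, hp, ?_⟩
            unfold pvMark; rw [hnt, decide_eq_true_iff]
            split_ifs at h1 <;> omega
          · have hp0 : p < 0 := by split_ifs at h2 <;> omega
            have hjmem : ((k : Int)) ∈ PySem.List.pyRange (max (maxlen + p) 0)
                (maxlen + min ((pvNextTok maxlen lt p).getD p) 0) 1 := by
              rw [hnt, Option.getD_some, PySem.List.mem_pyRange_one]
              split_ifs at h2 <;> omega
            have hcv := hcov p hp _ hjmem
            rw [cov_eq_any_mark _ _ _ _ hk] at hcv
            rwa [List.any_eq_true] at hcv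
    · intro h; rw [List.any_eq_true] at h ⊢
      obtain ⟨p, hp, hB⟩ := h
      refine ⟨p, hp, ?_⟩
      unfold pvMark at hB; unfold pvMarkA
      cases hnt : pvNextTok maxlen lt p with
      | none => rw [hnt] at hB; cases hB
      | some s =>
        dsimp only at hB ⊢
        rw [hnt] at hB
        dsimp only at hB
        rw [decide_eq_true_iff] at hB
        have hge : ¬ p ≥ maxlen := by omega
        rw [if_neg hge, decide_eq_true_iff]
        split_ifs <;> omega
  cases h1 : vp.any (fun p => pvMarkA maxlen lt p k) <;>
    cases h2 : vp.any (fun p => pvMark maxlen lt p k) <;> simp_all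

theorem countP_snoc_int (pref : List Int) (p : Int) (f : Int → Bool) :
    (((pref ++ [p]).countP f : Int)) = (pref.countP f : Int) + if f p then 1 else 0 := by
  rw [List.countP_append, List.countP_cons, List.countP_nil]
  split_ifs with h <;> simp

theorem mark_false_cases (maxlen : Int) (lt : List Int) (p : Int) (k : Nat)
    (h : ∀ s, pvNextTok maxlen lt p = some s → ¬ (max p 0 ≤ (k : Int) ∧ (k : Int) < min s maxlen)) :
    pvMark maxlen lt p k = false := by
  unfold pvMark
  cases hnt : pvNextTok maxlen lt p with
  | none => rfl
  | some s => simp only [decide_eq_false_iff_not]; exact h s hnt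

theorem sum_take_set_add (l : List Int) (j : Nat) (δ : Int) (hj : j < l.length) (k : Nat) :
    ((l.set j (l.getD j 0 + δ)).take (k + 1)).sum =
      (l.take (k + 1)).sum + if j ≤ k then δ else 0 := by
  rw [List.take_set]
  by_cases h : j ≤ k
  · have hjt : j < (l.take (k + 1)).length := by simp; omega
    rw [List.sum_set]
    rw [if_pos hjt, if_pos h]
    have hgetD : l.getD j 0 = (l.take (k + 1))[j] := by
      rw [List.getElem_take, List.getD_eq_getElem _ 0 hj]
    have hdecomp : (l.take (k + 1)).sum =
        (List.take j (l.take (k + 1))).sum + (l.take (k + 1))[j] + (List.drop (j + 1) (l.take (k + 1))).sum := by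
      conv_lhs => rw [← List.sum_take_add_sum_drop (l.take (k + 1)) (j + 1)]
      rw [List.sum_take_succ _ _ hjt]
    rw [hdecomp, hgetD]
    ring
  · have hjt : ¬ j < (l.take (k + 1)).length := by simp; omega
    rw [List.set_eq_of_length_le (by omega), if_neg h]
    ring

theorem stepB_inv (maxlen : Int) (lt : List Int) (diff : List Int) (pref : List Int) (p : Int)
    (hlen : diff.length = (max maxlen 0).toNat + 1)
    (hsum : ∀ k, k < maxlen.toNat →
      (diff.take (k + 1)).sum = (pref.countP (fun q => pvMark maxlen lt q k) : Int)) :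
    (pvStepB maxlen lt diff p).length = (max maxlen 0).toNat + 1 ∧
    ∀ k, k < maxlen.toNat →
      ((pvStepB maxlen lt diff p).take (k + 1)).sum =
        ((pref ++ [p]).countP (fun q => pvMark maxlen lt q k) : Int) := by
  unfold pvStepB
  dsimp only
  by_cases hge : max p 0 ≥ maxlen
  · rw [if_pos hge]
    refine ⟨hlen, fun k hk => ?_⟩
    rw [hsum k hk, countP_snoc_int, mark_false_cases _ _ _ _ (fun s hs => by rintro ⟨a, b⟩; omega)]
    simp
  · rw [if_neg hge]
    cases hnt : pvNextTok maxlen lt p with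
    | none =>
      refine ⟨hlen, fun k hk => ?_⟩
      rw [hsum k hk, countP_snoc_int, mark_false_cases _ _ _ _ (fun s hs => by rw [hs] at hnt; cases hnt)]
      simp
    | some s =>
      dsimp only
      by_cases hlr : max p 0 < min s maxlen
      · rw [if_pos hlr]
        have hml : 0 < maxlen := by omega
        have hmm : (max maxlen 0).toNat = maxlen.toNat := by omega
        set L : Int := max p 0 with hL
        set R : Int := min s maxlen with hR
        have hL0 : 0 ≤ L := by omega
        have hRm : R ≤ maxlen := by omega
        have hcastL : L = ((L.toNat : Nat) : Int) := by omega
        have hcastR : R = ((R.toNat : Nat) : Int) := by omega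
        rw [hcastL, hcastR]
        rw [PySem.List.pyGetD_natCast, PySem.List.pySetD_natCast]
        rw [PySem.List.pyGetD_natCast, PySem.List.pySetD_natCast]
        have hLlen : L.toNat < diff.length := by rw [hlen]; omega
        have hRlen : R.toNat < (diff.set L.toNat (diff.getD L.toNat 0 + 1)).length := by
          rw [List.length_set, hlen]; omega
        refine ⟨by simp [List.length_set, hlen], fun k hk => ?_⟩
        rw [show (diff.set L.toNat (diff.getD L.toNat 0 + 1)).getD R.toNat 0 - 1 =
              (diff.set L.toNat (diff.getD L.toNat 0 + 1)).getD R.toNat 0 + (-1) from by ring]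
        rw [sum_take_set_add _ _ _ hRlen k, sum_take_set_add _ _ _ hLlen k]
        rw [hsum k hk, countP_snoc_int]
        have hmark : pvMark maxlen lt p k = decide (L ≤ (k : Int) ∧ (k : Int) < R) := by
          unfold pvMark; rw [hnt]
        rw [hmark]
        simp only [decide_eq_true_eq]
        split_ifs <;> omega
      · rw [if_neg hlr]
        refine ⟨hlen, fun k hk => ?_⟩
        rw [hsum k hk, countP_snoc_int, mark_false_cases _ _ _ _ (fun s' hs' => by
          rw [hnt] at hs'; cases hs'; rintro ⟨a, b⟩; omega)]
        simp

theorem foldB_inv (maxlen : Int) (lt : List Int) : ∀ (rest pref : List Int) (diff : List Int),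
    diff.length = (max maxlen 0).toNat + 1 →
    (∀ k, k < maxlen.toNat →
      (diff.take (k + 1)).sum = (pref.countP (fun q => pvMark maxlen lt q k) : Int)) →
    (rest.foldl (pvStepB maxlen lt) diff).length = (max maxlen 0).toNat + 1 ∧
    ∀ k, k < maxlen.toNat →
      ((rest.foldl (pvStepB maxlen lt) diff).take (k + 1)).sum =
        ((pref ++ rest).countP (fun q => pvMark maxlen lt q k) : Int) := by
  intro rest
  induction rest with
  | nil =>
    intro pref diff h1 h2
    simp only [List.foldl_nil, List.append_nil]
    exact ⟨h1, h2⟩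
  | cons p ps ih =>
    intro pref diff h1 h2
    obtain ⟨g1, g2⟩ := stepB_inv maxlen lt diff pref p h1 h2
    simp only [List.foldl_cons]
    have := ih (pref ++ [p]) _ g1 g2
    simpa using this

theorem sweep_aux (diff : List Int) : ∀ (t : Nat), t ≤ diff.length →
    ((PySem.List.pyRange 0 (t : Int) 1).foldl
      (fun (st : Int × List Int) i =>
        let run := st.1 + PySem.List.pyGetD diff i 0
        (run, st.2 ++ [if run > 0 then (1 : Int) else 0]))
      ((0 : Int), ([] : List Int))) =
    ((diff.take t).sum,
      (List.range t).map (fun k => if (diff.take (k + 1)).sum > 0 then (1 : Int) else 0)) := by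
  intro t
  induction t with
  | zero =>
    intro _
    rw [PySem.List.pyRange_one_eq_nil (by omega)]
    simp
  | succ t ih =>
    intro ht
    have hgd : PySem.List.pyGetD diff ((t : Nat) : Int) 0 = diff[t]'(by omega) := by
      rw [PySem.List.pyGetD_natCast]
      exact List.getD_eq_getElem _ 0 (by omega)
    have hts : (List.take (t + 1) diff).sum = (List.take t diff).sum + diff[t]'(by omega) :=
      List.sum_take_succ _ _ (by omega)
    have hcast : ((t + 1 : Nat) : Int) = ((t : Nat) : Int) + 1 := by push_cast; ring
    rw [hcast, PySem.List.pyRange_one_succ_right (by omega), List.foldl_append, ih (by omega)]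
    simp only [List.foldl_cons, List.foldl_nil]
    rw [hgd, ← hts]
    rw [List.range_succ, List.map_append]
    rfl

theorem altB_common (maxlen : Int) (vp lt : List Int) (hvp : vp ≠ []) :
    sample_place_sequence_alt maxlen vp lt = pvCommon maxlen lt vp := by
  unfold sample_place_sequence_alt
  rw [if_neg hvp]
  have hinit2 : ∀ k, k < maxlen.toNat →
      ((List.replicate ((max maxlen 0).toNat + 1) (0 : Int)).take (k + 1)).sum =
        ((([] : List Int).countP (fun q => pvMark maxlen lt q k)) : Int) := by
    intro k hk; simp [List.take_replicate, List.sum_replicate]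
  obtain ⟨hdl, hds⟩ := foldB_inv maxlen lt vp [] _ (by simp) hinit2
  simp only [List.nil_append] at hds
  show ((PySem.List.pyRange 0 maxlen 1).foldl
      (fun (st : Int × List Int) i =>
        let run := st.1 + PySem.List.pyGetD
          (vp.foldl (pvStepB maxlen lt) (List.replicate ((max maxlen 0).toNat + 1) (0 : Int))) i 0
        (run, st.2 ++ [if run > 0 then (1 : Int) else 0]))
      ((0 : Int), ([] : List Int))).2 = pvCommon maxlen lt vp
  by_cases hml : maxlen ≤ 0
  · rw [PySem.List.pyRange_one_eq_nil hml]
    have hz : maxlen.toNat = 0 := by omega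
    simp [pvCommon, hz]
  · have hcast : PySem.List.pyRange 0 maxlen 1 = PySem.List.pyRange 0 ((maxlen.toNat : Nat) : Int) 1 := by
      congr 1; omega
    rw [hcast, sweep_aux _ maxlen.toNat (by rw [hdl]; omega)]
    unfold pvCommon
    apply List.map_congr_left
    intro k hk
    rw [List.mem_range] at hk
    rw [hds k hk]
    have hiff : ((vp.countP (fun q => pvMark maxlen lt q k) : Int) > 0) ↔
        (vp.any (fun q => pvMark maxlen lt q k) = true) := by
      rw [gt_iff_lt, Int.natCast_pos, List.countP_pos_iff, List.any_eq_true]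
    rw [if_congr hiff rfl rfl]

theorem aA_commonA (maxlen : Int) (vp lt : List Int) (hvp : vp ≠ [])
    (hpre : ∀ p ∈ vp, p ∈ lt ∧ (maxlen ≤ p ∨ -maxlen ≤ p)) :
    sample_place_sequence maxlen vp lt = pvCommonA maxlen lt vp := by
  unfold sample_place_sequence
  rw [if_neg hvp, ← pvCommonA_nil maxlen lt, foldA_commonA maxlen lt vp [] hpre]
  simp

theorem tight_core (maxlen : Int) (vp lt : List Int)
    (hpre : ∀ p ∈ vp, p ∈ lt ∧ (maxlen ≤ p ∨ -maxlen ≤ p))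
    (hd : ∃ p ∈ vp, p < 0 ∧ ∃ j ∈ PySem.List.pyRange (max (maxlen + p) 0)
        (maxlen + min ((pvNextTok maxlen lt p).getD p) 0) 1,
      ∀ q ∈ vp, j < q ∨ (pvNextTok maxlen lt q).getD q ≤ j) :
    sample_place_sequence maxlen vp lt ≠ sample_place_sequence_alt maxlen vp lt := by
  obtain ⟨p, hp, hpneg, j, hj, hunc⟩ := hd
  have hvp : vp ≠ [] := by rintro rfl; cases hp
  have hbd := (hpre p hp).2
  cases hnt : pvNextTok maxlen lt p with
  | none =>
    rw [hnt, Option.getD_none, PySem.List.mem_pyRange_one] at hj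
    exact absurd hj (by omega)
  | some s =>
    rw [hnt, Option.getD_some, PySem.List.mem_pyRange_one] at hj
    have hcov : pvCov maxlen lt vp j = false := (uncov_iff maxlen lt vp j).1 hunc
    have hp0 : p < 0 := by omega
    have hpm : -maxlen ≤ p := by
      rcases hbd with h | h
      · exfalso; omega
      · exact h
    have hml : 0 < maxlen := by omega
    set k := j.toNat with hkdef
    have hkj : (k : Int) = j := by omega
    have hk : k < maxlen.toNat := by omega
    intro heq
    rw [aA_commonA maxlen vp lt hvp hpre, altB_common maxlen vp lt hvp] at heq
    have h1 := congrArg (fun l => l.getD k 0) heq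
    dsimp at h1
    rw [getD_pvCommonA _ _ _ _ hk, getD_pvCommon _ _ _ _ hk] at h1
    have hA : (vp.any fun q => pvMarkA maxlen lt q k) = true := by
      rw [List.any_eq_true]
      refine ⟨p, hp, ?_⟩
      unfold pvMarkA; rw [hnt]
      dsimp only
      rw [if_neg (by omega), decide_eq_true_iff]
      right
      refine ⟨by omega, ?_⟩
      split_ifs <;> omega
    have hB : (vp.any fun q => pvMark maxlen lt q k) = false := by
      rw [← cov_eq_any_mark _ _ _ _ hk, hkj]
      exact hcov
    rw [hA, hB] at h1
    simp at h1

-- ===== VERDICT (by name: the statement is the Claim_ definition above) =====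
theorem sample_place_sequence_spec : Claim_unchanged_sample_place_sequence := by
  intro maxlen vp lt hdom hpre hnd
  by_cases hvp : vp = []
  · subst hvp
    simp [sample_place_sequence, sample_place_sequence_alt]
  · have hpre' : ∀ p ∈ vp, p ∈ lt ∧ (maxlen ≤ p ∨ -maxlen ≤ p) := by
      rcases hpre with h | h
      · exact absurd h hvp
      · exact h
    have hnd' : ∀ p ∈ vp, ∀ j ∈ PySem.List.pyRange (max (maxlen + p) 0)
        (maxlen + min ((pvNextTok maxlen lt p).getD p) 0) 1,
          pvCov maxlen lt vp j = true := by
      intro p hp j hj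
      by_contra hb
      have hb' : pvCov maxlen lt vp j = false := by
        cases h : pvCov maxlen lt vp j with
        | false => rfl
        | true => exact absurd h hb
      apply hnd
      have hjm := hj
      rw [PySem.List.mem_pyRange_one] at hjm
      exact ⟨p, hp, by omega, j, hj, (uncov_iff maxlen lt vp j).2 hb'⟩
    rw [aA_commonA maxlen vp lt hvp hpre', altB_common maxlen vp lt hvp,
      commonA_eq_common maxlen lt vp hpre' hnd']

theorem sample_place_sequence_changed : Claim_changed_sample_place_sequence := by
  unfold Claim_changed_sample_place_sequence; decide

theorem sample_place_sequence_tight : Claim_exact_sample_place_sequence := by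
  intro maxlen vp lt hdom hpre hd
  have hvp : vp ≠ [] := by
    intro h; subst h
    obtain ⟨p, hp, -⟩ := hd
    simp at hp
  have hpre' : ∀ p ∈ vp, p ∈ lt ∧ (maxlen ≤ p ∨ -maxlen ≤ p) := by
    rcases hpre with h | h
    · exact absurd h hvp
    · exact h
  exact tight_core maxlen vp lt hpre' hd
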